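-- pv_equiv track=rewrite | github.com/kw-pp/algorithm_Study | susie/Programmers/20220730_test02.py | solution
-- ===== SOURCE A (Python) =====
-- from collections import defaultdict
-- import copy
--
-- def solution(want, number, discount):
--     answer = 0
--
--     dic = defaultdict(int)
--     for w, n in zip(want, number):
--         dic[w] = n
--
--     for day in range(len(discount)-9):
--         renew_dic = copy.deepcopy(dic)
--         for idx in range(10):
--             if idx == 9 and renew_dic[discount[day+idx]]:
--                 answer += 1
--                 break
--
--             if renew_dic[discount[day+idx]] == 0:
--                 break
--             else:
--                 renew_dic[discount[day+idx]] -= 1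
--
--     return answer
-- ===== SOURCE B (Python) =====
-- def solution(want, number, discount):
--     need = dict(zip(want, number))
--
--     def ok(window):
--         cnt = {}
--         for x in window:
--             cnt[x] = cnt.get(x, 0) + 1
--         return all(c <= need.get(x, 0) for x, c in cnt.items())
--
--     return sum(ok(discount[d:d + 10]) for d in range(len(discount) - 9))
-- ===== Notes on version B (the rewrite author's own statement) =====
-- stated objective: faster
-- what changed: A simulates each 10-day window by deep-copying the whole stock dict and consuming items one by one with early breaks; B counts each window's items once and checks 'no item's window count exceeds its wanted quantity', with no O(W) dict copy per window; Pre_ excludes inputs where (with at least one 10-day window) an item wanted in a negative quantity appears in the discount list - counts are naturally non-negative, and there A's simulation (negative stock never reaches zero, hence unlimited) and B's comparison (a count is never <= a negative need) are equally arbitrary.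
-- outside the precondition, e.g. on solution(['a'], [-1], ['a', 'a', 'a', 'a', 'a', 'a', 'a', 'a', 'a', 'a']): A returns 1, B returns 0
import Mathlib
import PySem

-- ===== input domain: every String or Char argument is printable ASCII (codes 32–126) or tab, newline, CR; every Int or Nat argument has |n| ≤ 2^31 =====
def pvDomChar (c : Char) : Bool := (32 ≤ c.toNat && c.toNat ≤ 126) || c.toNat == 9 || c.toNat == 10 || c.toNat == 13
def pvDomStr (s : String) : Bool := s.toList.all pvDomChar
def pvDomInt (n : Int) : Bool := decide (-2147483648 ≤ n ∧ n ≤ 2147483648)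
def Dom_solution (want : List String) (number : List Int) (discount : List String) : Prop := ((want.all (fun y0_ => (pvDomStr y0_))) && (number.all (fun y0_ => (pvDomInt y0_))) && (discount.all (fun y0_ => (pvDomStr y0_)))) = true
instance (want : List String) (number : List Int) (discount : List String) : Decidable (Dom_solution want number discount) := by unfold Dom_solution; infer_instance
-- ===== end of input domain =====

-- B replaces A's per-window deep-copied consumption simulation by a per-window item count
-- checked against the wanted quantities; objective: faster (no O(W) dict copy per window).


-- ===== PORT A =====
-- inner 'for idx in range(10)' loop of A, entered at position idx with the working copy renew_dic;
-- returns the window's contribution to answer (0 or 1).  (Python tests 'idx == 9'; idx only takes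
-- values 0..9 here, so 'idx ≥ 9' is the same test and gives the decreasing measure.)
def solutionInner (discount : List String) (day : Int) (renew : PySem.Dict String Int) (idx : Nat) : Int :=
  let item := (PySem.List.pyGet? discount (day + (idx : Int))).getD ""
  if idx ≥ 9 then
    if renew.getD item 0 ≠ 0 then 1 else 0
  else
    if renew.getD item 0 = 0 then 0
    else solutionInner discount day (renew.insert item (renew.getD item 0 - 1)) (idx + 1)
termination_by 9 - idx
decreasing_by omega

def solution (want : List String) (number : List Int) (discount : List String) : Int :=
  let dic : PySem.Dict String Int :=
    (want.zip number).foldl (fun d wn => d.insert wn.1 wn.2) PySem.Dict.empty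
  (PySem.List.pyRange 0 (PySem.List.len discount - 9) 1).foldl
    (fun answer day => answer + solutionInner discount day dic 0) 0

-- ===== PORT B =====
-- B's helper ok(window): count the window's items, then compare each count with the wanted quantity.
def solutionAltOk (need : PySem.Dict String Int) (window : List String) : Bool :=
  let cnt : PySem.Dict String Int :=
    window.foldl (fun d x => d.insert x (d.getD x 0 + 1)) PySem.Dict.empty
  cnt.items.all (fun p => decide (p.2 ≤ need.getD p.1 0))

def solution_alt (want : List String) (number : List Int) (discount : List String) : Int :=
  let need : PySem.Dict String Int :=
    (want.zip number).foldl (fun d wn => d.insert wn.1 wn.2) PySem.Dict.empty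
  (PySem.List.pyRange 0 (PySem.List.len discount - 9) 1).foldl
    (fun acc d =>
      acc + (if solutionAltOk need (PySem.List.slice discount (some d) (some (d + 10))) then 1 else 0))
    0

-- ===== PRECONDITION & SPEC =====
-- Pre_ excludes inputs where (there being at least one 10-day window) an item wanted in a
-- NEGATIVE quantity appears in the discount list: counts are naturally non-negative, and on such
-- inputs A's simulation (a negative stock value never reaches zero, hence acts as unlimited) and
-- B's comparison (a window count is never ≤ a negative need) are equally arbitrary readings of a
-- nonsensical quantity.
def Pre_solution (want : List String) (number : List Int) (discount : List String) : Prop :=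
  10 ≤ discount.length → ∀ p ∈ want.zip number, p.1 ∈ discount → 0 ≤ p.2
instance (want : List String) (number : List Int) (discount : List String) : Decidable (Pre_solution want number discount) := by unfold Pre_solution; infer_instance

def pvWitness_solution : List String × List Int × List String :=
  (["mask", "soap"], [2, 1],
   ["mask", "soap", "mask", "rice", "mask", "mask", "soap", "rice", "rice", "mask", "soap"])

def Spec_solution (want : List String) (number : List Int) (discount : List String) (out : Int) : Prop := out = solution_alt want number discount
instance (want : List String) (number : List Int) (discount : List String) (out : Int) : Decidable (Spec_solution want number discount out) := by unfold Spec_solution; infer_instance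

-- ===== CLAIM (what is proved, stated in full; the proofs are below) =====
def Claim_equal_solution : Prop := ∀ (want : List String) (number : List Int) (discount : List String), Dom_solution want number discount → Pre_solution want number discount → Spec_solution want number discount (solution want number discount)

-- ===== LEMMAS AND PROOFS =====

-- Abstract form of A's consumption simulation over a list of items.
def pvSim (need : PySem.Dict String Int) : List String → Bool
  | [] => true
  | x :: xs =>
    if need.getD x 0 = 0 then false
    else pvSim (need.insert x (need.getD x 0 - 1)) xs

-- The simulation succeeds iff no item's multiplicity in the list exceeds a non-negative need.
lemma pvSim_iff (w : List String) : ∀ (need : PySem.Dict String Int),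
    pvSim need w = true ↔ ∀ x ∈ w, need.getD x 0 < 0 ∨ (w.count x : Int) ≤ need.getD x 0 := by
  induction w with
  | nil => intro need; simp [pvSim]
  | cons x xs ih =>
    intro need
    have hcx : (x :: xs).count x = xs.count x + 1 := List.count_cons_self
    by_cases h0 : need.getD x 0 = 0
    · simp only [pvSim, h0, if_true]
      constructor
      · intro h; exact absurd h (by simp)
      · intro h
        have hx := h x (by simp)
        rw [hcx] at hx
        push_cast at hx
        omega
    · simp only [pvSim, h0, if_false, ih]
      constructor
      · intro h y hy
        by_cases hyx : y = x
        · subst hyx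
          by_cases hmem : y ∈ xs
          · have hh := h y hmem
            rw [PySem.Dict.getD_insert_self] at hh
            rw [hcx]; push_cast; omega
          · have hc0 : xs.count y = 0 := List.count_eq_zero_of_not_mem hmem
            rw [hcx, hc0]; push_cast; omega
        · have hyxs : y ∈ xs := by
            rcases List.mem_cons.mp hy with h1 | h1
            · exact absurd h1 hyx
            · exact h1
          have hh := h y hyxs
          rw [PySem.Dict.getD_insert] at hh
          rw [if_neg hyx] at hh
          have hc : List.count y (x :: xs) = List.count y xs := by
            simp [Ne.symm hyx]
          rw [hc]
          exact hh
      · intro h y hy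
        by_cases hyx : y = x
        · subst hyx
          rw [PySem.Dict.getD_insert_self]
          have hh := h y (by simp)
          rw [hcx] at hh
          push_cast at hh
          omega
        · rw [PySem.Dict.getD_insert]
          rw [if_neg hyx]
          have hh := h y (List.mem_cons_of_mem x hy)
          have hc : List.count y (x :: xs) = List.count y xs := by
            simp [Ne.symm hyx]
          rw [hc] at hh
          exact hh

-- The need dict's value at x is non-negative provided every zipped pair keyed x is.
lemma needD_nonneg (x : String) : ∀ (l : List (String × Int)), (∀ p ∈ l, p.1 = x → 0 ≤ p.2) →
    ∀ (d : PySem.Dict String Int), 0 ≤ d.getD x 0 →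
      0 ≤ (l.foldl (fun d wn => d.insert wn.1 wn.2) d).getD x 0 := by
  intro l
  induction l with
  | nil => intro _ d hd; exact hd
  | cons p l ih =>
    intro hl d hd
    refine ih (fun q hq hqx => hl q (List.mem_cons_of_mem p hq) hqx) _ ?_
    rw [PySem.Dict.getD_insert]
    split_ifs with h
    · exact hl p (by simp) h.symm
    · exact hd

-- With non-negative needs, B's window check computes the same condition as the simulation.
lemma solutionAltOk_eq_pvSim (need : PySem.Dict String Int) (w : List String)
    (hneed : ∀ x ∈ w, 0 ≤ need.getD x 0) :
    solutionAltOk need w = pvSim need w := by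
  have hA : solutionAltOk need w = true
      ↔ ∀ x ∈ w, (w.count x : Int) ≤ need.getD x 0 := by
    simp only [solutionAltOk]
    rw [PySem.Dict.foldl_insert_getD_add_one_eq_counter, PySem.Dict.items_counter]
    simp only [List.all_map, List.all_eq_true, Function.comp]
    constructor
    · intro h x hx
      have := h x ((PySem.Set.mem_ofList w x).mpr hx)
      simpa using this
    · intro h x hx
      have := h x ((PySem.Set.mem_ofList w x).mp hx)
      simpa using this
  have hiff : (solutionAltOk need w = true) ↔ (pvSim need w = true) := by
    rw [hA, pvSim_iff]
    constructor
    · intro h x hx; exact Or.inr (h x hx)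
    · intro h x hx
      rcases h x hx with h1 | h1
      · exact absurd (hneed x hx) (by omega)
      · exact h1
  exact Bool.eq_iff_iff.mpr hiff

-- A's inner loop, entered at idx with working dict renew, equals the simulation on the rest of the window.
lemma solutionInner_eq_pvSim (discount : List String) (d : Nat) (hd : d + 10 ≤ discount.length) :
    ∀ (k idx : Nat), idx ≤ 9 → k = 9 - idx → ∀ (renew : PySem.Dict String Int),
      solutionInner discount (d : Int) renew idx
        = if pvSim renew ((discount.drop (d + idx)).take (10 - idx)) then 1 else 0 := by
  intro k
  induction k with
  | zero =>
    intro idx hidx hk renew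
    have h9 : idx = 9 := by omega
    subst h9
    have hlt : d + 9 < discount.length := by omega
    have hdrop : discount.drop (d + 9) = discount[d + 9] :: discount.drop (d + 9 + 1) :=
      List.drop_eq_getElem_cons hlt
    have hitem : (PySem.List.pyGet? discount ((d : Int) + ((9 : Nat) : Int))).getD ""
        = discount[d + 9] := by
      have : (d : Int) + ((9 : Nat) : Int) = ((d + 9 : Nat) : Int) := by push_cast; ring
      rw [this, PySem.List.pyGet?_natCast, List.getElem?_eq_getElem hlt]; rfl
    rw [solutionInner]
    simp only [hitem, ge_iff_le, le_refl, if_true]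
    rw [hdrop]
    show _ = if pvSim renew (List.take 1 _) then _ else _
    rw [List.take_succ_cons, List.take_zero]
    by_cases h : renew.getD discount[d + 9] 0 = 0 <;> simp [pvSim, h]
  | succ k ih =>
    intro idx hidx hk renew
    have hlt : d + idx < discount.length := by omega
    have hdrop : discount.drop (d + idx) = discount[d + idx] :: discount.drop (d + idx + 1) :=
      List.drop_eq_getElem_cons hlt
    have hitem : (PySem.List.pyGet? discount ((d : Int) + (idx : Int))).getD ""
        = discount[d + idx] := by
      have : (d : Int) + (idx : Int) = ((d + idx : Nat) : Int) := by push_cast; ring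
      rw [this, PySem.List.pyGet?_natCast, List.getElem?_eq_getElem hlt]; rfl
    have htake : 10 - idx = (10 - (idx + 1)) + 1 := by omega
    rw [solutionInner]
    simp only [hitem, ge_iff_le]
    rw [if_neg (by omega : ¬ (9 : Nat) ≤ idx)]
    rw [hdrop, htake, List.take_succ_cons]
    by_cases h : renew.getD discount[d + idx] 0 = 0
    · rw [if_pos h]
      simp [pvSim, h]
    · rw [if_neg h, ih (idx + 1) (by omega) (by omega)]
      have e : d + idx + 1 = d + (idx + 1) := by omega
      rw [e]
      simp only [pvSim, h, if_false]

-- Per starting day, A's window contribution equals B's (for non-negative needs).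
lemma perDay_eq (discount : List String) (dic : PySem.Dict String Int)
    (hdic : ∀ x ∈ discount, 0 ≤ dic.getD x 0) (day : Int)
    (h0 : 0 ≤ day) (h1 : day < PySem.List.len discount - 9) :
    solutionInner discount day dic 0
      = if solutionAltOk dic (PySem.List.slice discount (some day) (some (day + 10))) then 1 else 0 := by
  obtain ⟨d, rfl⟩ : ∃ d : Nat, day = (d : Int) := ⟨day.toNat, (Int.toNat_of_nonneg h0).symm⟩
  have hd : d + 10 ≤ discount.length := by
    rw [PySem.List.len_eq] at h1; omega
  have hslice : PySem.List.slice discount (some (d : Int)) (some ((d : Int) + 10))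
      = (discount.drop d).take 10 := by
    have h10 : ((d : Int) + 10) = ((d : Int) + ((10 : Nat) : Int)) := by norm_num
    rw [h10, PySem.List.slice_natCast_add]
  rw [hslice, solutionAltOk_eq_pvSim dic _
    (fun x hx => hdic x (List.mem_of_mem_drop (List.mem_of_mem_take hx)))]
  have := solutionInner_eq_pvSim discount d hd 9 0 (by omega) (by omega) dic
  simpa using this

-- ===== VERDICT (by name: the statement is the Claim_ definition above) =====
theorem solution_spec : Claim_equal_solution := by
  intro want number discount _ hpre
  show solution want number discount = solution_alt want number discount
  unfold solution solution_alt
  apply PySem.List.foldl_congr_mem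
  intro acc day hday
  rw [PySem.List.mem_pyRange_one] at hday
  have hlen : 10 ≤ discount.length := by
    have := hday.2
    rw [PySem.List.len_eq] at this
    omega
  have hdic : ∀ x ∈ discount, 0 ≤
      ((want.zip number).foldl (fun d wn => d.insert wn.1 wn.2)
        (PySem.Dict.empty : PySem.Dict String Int)).getD x 0 :=
    fun x hx => needD_nonneg x _
      (fun p hp hpx => hpre hlen p hp (hpx ▸ hx)) _ (by simp [PySem.Dict.getD_empty])
  rw [perDay_eq discount _ hdic day hday.1 hday.2]
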